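-- pv_equiv track=rewrite | github.com/prositen/advent-of-code | python/src/y2023/dec24.py | find_velocity
-- ===== SOURCE A (Python) =====
-- def find_velocity(group):
--     possible_v = set()
--     for velocity, distances in group.items():
--         if len(distances) < 2:
--             continue
--         this_v = set()
--         for i, d1 in enumerate(distances):
--             for j, d2 in enumerate(distances[i + 1:]):
--                 diff = abs(d1 - d2)
--                 for pv in range(-500, 500):
--                     # The relative distance of the rock (pv - velocity)
--                     # must perfectly divide the distance between the rocks
--                     if pv != velocity and diff % (pv - velocity) == 0:
--                         this_v.add(pv)
--         if not possible_v:
--             possible_v = this_v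
--         else:
--             possible_v.intersection_update(this_v)
--
--     return possible_v
-- ===== SOURCE B (Python) =====
-- def find_velocity(group):
--     possible_v = set()
--     for velocity, distances in group.items():
--         if len(distances) < 2:
--             continue
--         this_v = set()
--         for i, d1 in enumerate(distances):
--             for d2 in distances[i + 1:]:
--                 diff = abs(d1 - d2)
--                 if diff == 0:
--                     cands = [pv for pv in range(-500, 500) if pv != velocity]
--                 else:
--                     # enumerate positive divisors of diff by trial division
--                     ks = []
--                     k = 1
--                     while k * k <= diff:
--                         if diff % k == 0:
--                             ks.append(k)
--                             ks.append(diff // k)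
--                         k += 1
--                     cands = sorted({velocity + s * k
--                                     for k in ks for s in (1, -1)
--                                     if -500 <= velocity + s * k < 500})
--                 this_v.update(cands)
--         if not possible_v:
--             possible_v = this_v
--         else:
--             possible_v.intersection_update(this_v)
--     return possible_v
-- ===== Notes on version B (the rewrite author's own statement) =====
-- stated objective: faster
-- what changed: Per pair of distances, B enumerates the positive divisors of the distance difference by trial division up to its square root and maps each divisor k to the candidate velocities v+k and v-k clipped to range(-500,500) (all of the range when the difference is 0), instead of A's scan of all 1000 candidate velocities testing divisibility per pair; the cross-group set intersection is unchanged.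
import Mathlib
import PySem

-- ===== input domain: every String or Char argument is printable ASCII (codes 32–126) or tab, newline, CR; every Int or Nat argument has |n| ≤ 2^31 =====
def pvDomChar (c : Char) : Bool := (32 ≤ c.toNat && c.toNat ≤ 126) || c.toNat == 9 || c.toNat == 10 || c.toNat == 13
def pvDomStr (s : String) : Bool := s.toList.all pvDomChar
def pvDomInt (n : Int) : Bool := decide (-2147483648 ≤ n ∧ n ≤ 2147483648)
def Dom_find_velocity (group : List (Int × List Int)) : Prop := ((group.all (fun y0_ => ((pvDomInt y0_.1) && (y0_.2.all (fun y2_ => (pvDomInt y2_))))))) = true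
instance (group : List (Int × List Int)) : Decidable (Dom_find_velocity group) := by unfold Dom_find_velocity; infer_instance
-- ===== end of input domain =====

-- B replaces A's scan of all 1000 candidate velocities per pair by trial-division divisor
-- enumeration of each pairwise distance difference (measured faster in a timing run).

-- ===== PORT A =====
-- 'for pv in range(-500, 500): if pv != velocity and diff % (pv - velocity) == 0: this_v.add(pv)'
def fvAddRange (v diff : Int) (s : PySem.Set Int) : PySem.Set Int :=
  (PySem.List.pyRange (-500) 500 1).foldl
    (fun s pv => if pv ≠ v ∧ PySem.Int.mod diff (pv - v) = 0 then PySem.Set.add s pv else s) s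

-- 'this_v = set(); for i, d1 in enumerate(distances): for j, d2 in enumerate(distances[i+1:]): diff = abs(d1-d2); …'
def fvThisA (v : Int) (distances : List Int) : PySem.Set Int :=
  (PySem.List.enumerate distances).foldl
    (fun s p =>
      (PySem.List.enumerate (PySem.List.slice distances (some (p.1 + 1)) none)).foldl
        (fun s q => fvAddRange v |p.2 - q.2| s) s)
    PySem.Set.empty

def find_velocity (group : List (Int × List Int)) : List Int :=
  group.foldl
    (fun acc p =>
      if p.2.length < 2 then acc
      else
        let this_v := fvThisA p.1 p.2
        if acc.isEmpty then this_v else PySem.Set.inter acc this_v)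
    PySem.Set.empty

-- ===== PORT B =====
-- 'ks = []; k = 1; while k*k <= n: (if n % k == 0: ks.append(k); ks.append(n // k)); k += 1'
-- (structural recursion on a fuel of n.toNat + 1 ≥ the number of loop iterations)
def fvTdgo (n : Int) : Nat → Int → List Int
  | 0, _ => []
  | f + 1, k =>
    if k * k ≤ n then
      (if PySem.Int.mod n k = 0 then k :: PySem.Int.floordiv n k :: fvTdgo n f (k + 1)
       else fvTdgo n f (k + 1))
    else []

def fvDivisors (n : Int) : List Int := fvTdgo n (n.toNat + 1) 1

-- 'cands = [pv for pv in range(-500, 500) if pv != velocity]' resp.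
-- 'cands = sorted({velocity + s*k for k in ks for s in (1, -1) if -500 <= velocity + s*k < 500})'
def fvCands (v diff : Int) : List Int :=
  if diff = 0 then (PySem.List.pyRange (-500) 500 1).filter (fun pv => decide (pv ≠ v))
  else
    PySem.List.sorted
      (PySem.Set.ofList
        ((fvDivisors diff).flatMap (fun k =>
          (([1, -1] : List Int).map (fun s => v + s * k)).filter
            (fun pv => decide (-500 ≤ pv ∧ pv < 500)))))
      (fun x => x) false

-- 'for i, d1 in enumerate(distances): for d2 in distances[i+1:]: …; this_v.update(cands)'
def fvThisB (v : Int) (distances : List Int) : PySem.Set Int :=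
  (PySem.List.enumerate distances).foldl
    (fun s p =>
      (PySem.List.slice distances (some (p.1 + 1)) none).foldl
        (fun s d2 => PySem.Set.update s (fvCands v |p.2 - d2|)) s)
    PySem.Set.empty

def find_velocity_alt (group : List (Int × List Int)) : List Int :=
  group.foldl
    (fun acc p =>
      if p.2.length < 2 then acc
      else
        let this_v := fvThisB p.1 p.2
        if acc.isEmpty then this_v else PySem.Set.inter acc this_v)
    PySem.Set.empty

-- ===== PRECONDITION & SPEC =====
def Spec_find_velocity (group : List (Int × List Int)) (out : List Int) : Prop := out = find_velocity_alt group
instance (group : List (Int × List Int)) (out : List Int) : Decidable (Spec_find_velocity group out) := by unfold Spec_find_velocity; infer_instance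

-- ===== CLAIM (what is proved, stated in full; the proofs are below) =====
def Claim_equal_find_velocity : Prop := ∀ (group : List (Int × List Int)), Dom_find_velocity group → Spec_find_velocity group (find_velocity group)

-- ===== LEMMAS AND PROOFS =====

-- elements of the trial-division loop's list, below a fuel bound
theorem mem_fvTdgo (n : Int) :
    ∀ (f : Nat) (k m : Int), 0 < k → (∀ j : Int, k ≤ j → j * j ≤ n → j < k + f) →
      (m ∈ fvTdgo n f k ↔ ∃ j : Int, k ≤ j ∧ j * j ≤ n ∧ j ∣ n ∧ (m = j ∨ m = n / j)) := by
  intro f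
  induction f with
  | zero =>
    intro k m hk hfuel
    simp only [fvTdgo, List.not_mem_nil, false_iff]
    rintro ⟨j, hkj, hjj, -, -⟩
    have := hfuel j hkj hjj
    omega
  | succ f ih =>
    intro k m hk hfuel
    by_cases hc : k * k ≤ n
    · have hrec := ih (k + 1) m (by omega)
        (by intro j h1 h2; have := hfuel j (by omega) h2; omega)
      by_cases hd : PySem.Int.mod n k = 0
      · have hdvd : k ∣ n := (PySem.Int.mod_eq_zero_iff_dvd n k).mp hd
        have hfd : PySem.Int.floordiv n k = n / k := PySem.Int.floordiv_eq_ediv_of_pos hk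
        simp only [fvTdgo, if_pos hc, if_pos hd, List.mem_cons, hrec, hfd]
        constructor
        · rintro (rfl | rfl | ⟨j, h1, h2, h3, h4⟩)
          · exact ⟨m, le_refl m, hc, hdvd, Or.inl rfl⟩
          · exact ⟨k, le_refl k, hc, hdvd, Or.inr rfl⟩
          · exact ⟨j, by omega, h2, h3, h4⟩
        · rintro ⟨j, h1, h2, h3, h4⟩
          rcases eq_or_lt_of_le h1 with rfl | hlt
          · rcases h4 with rfl | rfl
            · exact Or.inl rfl
            · exact Or.inr (Or.inl rfl)
          · exact Or.inr (Or.inr ⟨j, by omega, h2, h3, h4⟩)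
      · have hndvd : ¬ k ∣ n := fun h => hd ((PySem.Int.mod_eq_zero_iff_dvd n k).mpr h)
        simp only [fvTdgo, if_pos hc, if_neg hd, hrec]
        constructor
        · rintro ⟨j, h1, h2, h3, h4⟩; exact ⟨j, by omega, h2, h3, h4⟩
        · rintro ⟨j, h1, h2, h3, h4⟩
          rcases eq_or_lt_of_le h1 with rfl | hlt
          · exact absurd h3 hndvd
          · exact ⟨j, by omega, h2, h3, h4⟩
    · simp only [fvTdgo, if_neg hc, List.not_mem_nil, false_iff]
      rintro ⟨j, hkj, hjj, -, -⟩
      exact hc (le_trans (by nlinarith) hjj)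

-- the trial-division loop produces exactly the positive divisors (both of each divisor pair)
theorem mem_fvDivisors (n : Int) (hn : 0 < n) (m : Int) :
    m ∈ fvDivisors n ↔ 0 < m ∧ m ∣ n := by
  have htn : (n.toNat : Int) = n := Int.toNat_of_nonneg hn.le
  rw [fvDivisors, mem_fvTdgo n (n.toNat + 1) 1 m one_pos
    (by intro j h1 h2; have hjn : j ≤ n := (by nlinarith); omega)]
  constructor
  · rintro ⟨j, h1, h2, h3, rfl | rfl⟩
    · exact ⟨by omega, h3⟩
    · have hj0 : 0 < j := by omega
      have hjn : j ≤ n := by nlinarith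
      refine ⟨?_, ⟨j, (Int.ediv_mul_cancel h3).symm⟩⟩
      have := (Int.le_ediv_iff_mul_le hj0).mpr (by omega : 1 * j ≤ n)
      omega
  · rintro ⟨hm, hdvd⟩
    by_cases hmm : m * m ≤ n
    · exact ⟨m, by omega, hmm, hdvd, Or.inl rfl⟩
    · refine ⟨n / m, ?_, ?_, ?_, Or.inr ?_⟩
      · have hmn : m ≤ n := Int.le_of_dvd hn hdvd
        have := (Int.le_ediv_iff_mul_le hm).mpr (by omega : 1 * m ≤ n)
        omega
      · have hnm : n / m * m = n := Int.ediv_mul_cancel hdvd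
        nlinarith [Int.ediv_nonneg hn.le hm.le]
      · exact ⟨m, (Int.ediv_mul_cancel hdvd).symm⟩
      · have h1 : 1 ≤ n / m := (Int.le_ediv_iff_mul_le hm).mpr (by
          have := Int.le_of_dvd hn hdvd; omega)
        have hnm : m * (n / m) = n := Int.mul_ediv_cancel' hdvd
        set q := n / m with hq
        rw [← hnm, Int.mul_ediv_cancel _ (by omega : q ≠ 0)]

-- B's sorted candidate set for one pair is exactly A's filtered scan of range(-500, 500)
theorem fvCands_eq_filter (v diff : Int) (h : 0 ≤ diff) :
    fvCands v diff =
      (PySem.List.pyRange (-500) 500 1).filter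
        (fun pv => decide (pv ≠ v ∧ PySem.Int.mod diff (pv - v) = 0)) := by
  have hmod0 : ∀ b : Int, PySem.Int.mod 0 b = 0 :=
    fun b => (PySem.Int.mod_eq_zero_iff_dvd 0 b).mpr (dvd_zero b)
  rcases eq_or_lt_of_le h with rfl | hpos
  · rw [fvCands, if_pos rfl]
    exact List.filter_congr (by intro x hx; simp [hmod0])
  · rw [fvCands, if_neg (by omega)]
    apply PySem.List.sorted_eq_of_perm_of_pairwise_lt
    · apply (List.perm_ext_iff_of_nodup ?_ ?_).mpr
      · intro x
        simp only [List.mem_filter, PySem.List.mem_pyRange_one, decide_eq_true_eq,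
          PySem.Set.mem_ofList, List.mem_flatMap, List.mem_map, List.mem_cons,
          List.not_mem_nil, or_false, mem_fvDivisors diff hpos,
          PySem.Int.mod_eq_zero_iff_dvd]
        constructor
        · rintro ⟨⟨hlo, hhi⟩, hne, hdvd⟩
          refine ⟨|x - v|, ⟨abs_pos.mpr (sub_ne_zero.mpr hne), (abs_dvd _ _).mpr hdvd⟩, ?_⟩
          rcases le_or_gt 0 (x - v) with hge | hlt
          · exact ⟨⟨1, Or.inl rfl, by rw [abs_of_nonneg hge]; ring⟩, by omega⟩
          · exact ⟨⟨-1, Or.inr rfl, by rw [abs_of_neg (by omega : x - v < 0)]; ring⟩, by omega⟩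
        · rintro ⟨k, ⟨hk0, hkd⟩, ⟨s, hs1 | hs1, heq⟩, hrange⟩
          · subst hs1
            refine ⟨by omega, by omega, ?_⟩
            have : x - v = k := by omega
            rw [this]; exact hkd
          · subst hs1
            refine ⟨by omega, by omega, ?_⟩
            have : x - v = -k := by omega
            rw [this]; exact (neg_dvd).mpr hkd
      · exact List.Nodup.filter _ (PySem.List.nodup_pyRange_one _ _)
      · exact PySem.Set.nodup_ofList _
    · exact List.Pairwise.filter _ (PySem.List.pairwise_lt_pyRange_one _ _)

-- 'for x in l: if p(x): s.add(x)' is s.update of the filtered list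
theorem foldl_add_if (p : Int → Prop) [DecidablePred p] (l : List Int) :
    ∀ s : PySem.Set Int,
      l.foldl (fun s x => if p x then PySem.Set.add s x else s) s =
        PySem.Set.update s (l.filter (fun x => decide (p x))) := by
  induction l with
  | nil => intro s; simp [PySem.Set.update]
  | cons x t ih =>
    intro s
    by_cases hx : p x <;> simp [List.foldl_cons, hx, ih, PySem.Set.update_cons]

-- a fold over enumerate that ignores the index is a fold over the list
theorem foldl_enumerate_snd {α β : Type} (h : β → α → β) (xs : List α) :
    ∀ (s0 : Int) (a : β),
      (PySem.List.enumerate xs s0).foldl (fun a p => h a p.2) a = xs.foldl h a := by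
  induction xs with
  | nil => intro s0 a; simp [PySem.List.enumerate_nil]
  | cons x t ih => intro s0 a; simp [PySem.List.enumerate_cons, ih]

-- A's per-pair range scan = B's per-pair update with the sorted candidate list
theorem fvInner_eq (v a b : Int) (s : PySem.Set Int) :
    fvAddRange v |a - b| s = PySem.Set.update s (fvCands v |a - b|) := by
  rw [fvAddRange, foldl_add_if, fvCands_eq_filter v _ (abs_nonneg _)]

theorem fvThis_eq (v : Int) (ds : List Int) : fvThisA v ds = fvThisB v ds := by
  unfold fvThisA fvThisB
  simp only [fvInner_eq]
  have hbody : ∀ p : Int × Int,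
      (fun (s : PySem.Set Int) =>
        List.foldl (fun s q => PySem.Set.update s (fvCands v |p.2 - q.2|)) s
          (PySem.List.enumerate (PySem.List.slice ds (some (p.1 + 1)) none))) =
      (fun (s : PySem.Set Int) =>
        List.foldl (fun s d2 => PySem.Set.update s (fvCands v |p.2 - d2|)) s
          (PySem.List.slice ds (some (p.1 + 1)) none)) := by
    intro p
    funext s
    exact foldl_enumerate_snd (fun s d2 => PySem.Set.update s (fvCands v |p.2 - d2|)) _ 0 s
  exact List.foldl_ext _ _ _ (fun s p _ => congrFun (hbody p) s)

-- ===== VERDICT (by name: the statement is the Claim_ definition above) =====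
theorem find_velocity_spec : Claim_equal_find_velocity := by
  intro group _
  unfold Spec_find_velocity find_velocity find_velocity_alt
  simp only [fvThis_eq]
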